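-- pv_equiv track=rewrite | github.com/kamilamgad/PDFReader | pdf-notes/scripts/generate_notes.py | postprocess_rendered_lines
-- ===== SOURCE A (Python) =====
-- def postprocess_rendered_lines(lines: list[str], fields: dict[str, str]) -> list[str]:
--     output = list(lines)
--
--     if not fields.get("__has_second_insured__"):
--         output = remove_second_insured_block(output)
--     if not fields.get("__has_home__"):
--         output = remove_section(output, "///////////Home/////////", "///////////Auto/////////")
--     if not fields.get("__has_auto__"):
--         output = remove_section(output, "///////////Auto/////////", None)
--         output = remove_last_marker(output, "///////////Home/////////")
--
--     output = remove_blank_label_lines(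
--         output,
--         {
--             "Number of Units:",
--             "Building Ordinance or Law:",
--             "Sewer & Drain Damage:",
--             "1st Mortgagee:",
--             "Loan Number:",
--         },
--     )
--
--     output = [line for line in output if line != "///////////Home/////////"]
--
--     return collapse_blank_lines(output)
--
-- def remove_second_insured_block(lines: list[str]) -> list[str]:
--     if len(lines) < 9:
--         return lines
--     block = lines[4:9]
--     if len(block) == 5:
--         return lines[:4] + lines[9:]
--     return lines
--
-- def remove_section(lines: list[str], start_marker: str, end_marker: str | None) -> list[str]:
--     try:
--         start = lines.index(start_marker)
--     except ValueError:
--         return lines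
--
--     end = len(lines)
--     if end_marker is not None:
--         try:
--             end = lines.index(end_marker, start + 1)
--         except ValueError:
--             end = len(lines)
--     return lines[:start] + lines[end:]
--
-- def remove_last_marker(lines: list[str], marker: str) -> list[str]:
--     for index in range(len(lines) - 1, -1, -1):
--         if lines[index] == marker:
--             return lines[:index] + lines[index + 1 :]
--     return lines
--
-- def collapse_blank_lines(lines: list[str]) -> list[str]:
--     collapsed: list[str] = []
--     blank_run = 0
--     for line in lines:
--         if line.strip():
--             blank_run = 0
--             collapsed.append(line)
--             continue
--         if blank_run == 0:
--             collapsed.append("")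
--         blank_run += 1
--     while collapsed and collapsed[-1] == "":
--         collapsed.pop()
--     return collapsed
--
-- def remove_blank_label_lines(lines: list[str], labels: set[str]) -> list[str]:
--     result: list[str] = []
--     for line in lines:
--         stripped = line.strip()
--         if stripped in labels:
--             continue
--         result.append(line)
--     return result
-- ===== SOURCE B (Python) =====
-- HOME = "///////////Home/////////"
-- AUTO = "///////////Auto/////////"
-- LABELS = (
--     "Number of Units:",
--     "Building Ordinance or Law:",
--     "Sewer & Drain Damage:",
--     "1st Mortgagee:",
--     "Loan Number:",
-- )
--
--
-- def _split_first(lines, marker):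
--     """Lines before the first occurrence of marker, and the lines after it (None if absent)."""
--     pre = []
--     for i, ln in enumerate(lines):
--         if ln == marker:
--             return pre, lines[i + 1:]
--         pre.append(ln)
--     return pre, None
--
--
-- def _cut_section(lines, start, end):
--     pre, tail = _split_first(lines, start)
--     if tail is None:
--         return lines
--     if end is None:
--         return pre
--     _, rest = _split_first(tail, end)
--     return pre if rest is None else pre + [end] + rest
--
--
-- def _drop_last(lines, marker):
--     pre, rest = _split_first(lines[::-1], marker)
--     if rest is None:
--         return lines
--     return rest[::-1] + pre[::-1]
--
--
-- def postprocess_rendered_lines(lines, fields):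
--     out = list(lines)
--     if not fields.get("__has_second_insured__") and len(out) >= 9:
--         out = out[:4] + out[9:]
--     if not fields.get("__has_home__"):
--         out = _cut_section(out, HOME, AUTO)
--     if not fields.get("__has_auto__"):
--         out = _cut_section(out, AUTO, None)
--         out = _drop_last(out, HOME)
--     # one backward pass: drop blank-label / Home-marker lines and collapse blank runs
--     acc = []  # final output, in reverse
--     for ln in reversed(out):
--         stripped = ln.strip()
--         if stripped in LABELS or ln == HOME:
--             continue
--         if stripped:
--             acc.append(ln)
--         elif acc and acc[-1] != "":
--             acc.append("")
--     return acc[::-1]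
-- ===== Notes on version B (the rewrite author's own statement) =====
-- stated objective: alternative
-- what changed: Replaces index()+slice section removal with a split-at-first-marker helper, removes the last Home marker by splitting the reversed list instead of a downward index scan, and fuses the two filtering passes and the blank-line collapse (plus trailing-blank trim) into a single backward pass with no final pop loop.
import Mathlib
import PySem

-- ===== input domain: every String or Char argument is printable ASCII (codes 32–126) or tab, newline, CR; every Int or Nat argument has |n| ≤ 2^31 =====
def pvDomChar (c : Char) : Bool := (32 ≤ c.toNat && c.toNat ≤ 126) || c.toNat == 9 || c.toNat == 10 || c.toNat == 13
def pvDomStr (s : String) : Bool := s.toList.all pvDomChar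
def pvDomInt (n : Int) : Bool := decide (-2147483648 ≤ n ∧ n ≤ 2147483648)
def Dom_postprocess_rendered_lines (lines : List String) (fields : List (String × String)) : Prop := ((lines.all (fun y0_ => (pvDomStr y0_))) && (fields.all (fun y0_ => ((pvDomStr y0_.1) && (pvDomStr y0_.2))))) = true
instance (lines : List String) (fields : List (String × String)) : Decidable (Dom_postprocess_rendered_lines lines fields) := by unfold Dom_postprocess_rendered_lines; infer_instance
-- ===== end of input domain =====

-- B replaces index()+slice section removal by a split-at-first-marker helper, removes the last Home
-- marker by splitting the reversed list, and fuses the two filter passes, the blank-run collapse and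
-- the trailing-blank trim into one backward pass (alternative decomposition, same O(n) cost).

-- ===== PORT A =====
def pvHome : String := "///////////Home/////////"
def pvAuto : String := "///////////Auto/////////"

-- `not fields.get(k)`: missing key or empty string is falsy
def pvFlag (fields : List (String × String)) (k : String) : Bool :=
  match PySem.Dict.get? (PySem.Dict.mk fields) k with
  | none => false
  | some s => s != ""

def remove_second_insured_block (lines : List String) : List String :=
  if lines.length < 9 then lines
  else
    let block := PySem.List.slice lines (some 4) (some 9)
    if block.length == 5 then
      PySem.List.slice lines none (some 4) ++ PySem.List.slice lines (some 9) none
    else lines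

def remove_section (lines : List String) (startMarker : String) (endMarker : Option String) : List String :=
  match PySem.List.index? lines startMarker with
  | none => lines
  | some s =>
    let e : Nat :=
      match endMarker with
      | none => lines.length
      | some m =>
        -- lines.index(m, s+1): exact as search in lines[s+1:] plus offset s+1
        match PySem.List.index? (PySem.List.slice lines (some ((s : Int) + 1)) none) m with
        | none => lines.length
        | some j => s + 1 + j
    PySem.List.slice lines none (some (s : Int)) ++ PySem.List.slice lines (some (e : Int)) none

-- the `for index in range(len(lines)-1, -1, -1)` loop with early return
def rlmGo (lines : List String) (marker : String) : List Int → List String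
  | [] => lines
  | i :: rest =>
    if PySem.List.pyGet? lines i == some marker then
      PySem.List.slice lines none (some i) ++ PySem.List.slice lines (some (i + 1)) none
    else rlmGo lines marker rest

def remove_last_marker (lines : List String) (marker : String) : List String :=
  rlmGo lines marker (PySem.List.pyRange ((lines.length : Int) - 1) (-1) (-1))

def clbGo : List String → List String → Int → List String
  | [], collapsed, _ => collapsed
  | l :: ls, collapsed, blankRun =>
    if PySem.Str.strip l != "" then clbGo ls (collapsed ++ [l]) 0
    else if blankRun == 0 then clbGo ls (collapsed ++ [""]) (blankRun + 1)
    else clbGo ls collapsed (blankRun + 1)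

-- `while collapsed and collapsed[-1] == "": collapsed.pop()`
def popBlanks (l : List String) : List String :=
  if h : l.getLast? = some "" then popBlanks l.dropLast else l
termination_by l.length
decreasing_by
  have hne : l ≠ [] := by intro hn; subst hn; simp at h
  have : 0 < l.length := List.length_pos_iff.mpr hne
  simp [List.length_dropLast]; omega

def collapse_blank_lines (lines : List String) : List String :=
  popBlanks (clbGo lines [] 0)

def pvLabels : PySem.Set String :=
  PySem.Set.ofList ["Number of Units:", "Building Ordinance or Law:",
    "Sewer & Drain Damage:", "1st Mortgagee:", "Loan Number:"]

def rbllGo (labels : PySem.Set String) : List String → List String → List String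
  | [], result => result
  | l :: ls, result =>
    if PySem.Set.contains labels (PySem.Str.strip l) then rbllGo labels ls result
    else rbllGo labels ls (result ++ [l])

def remove_blank_label_lines (lines : List String) (labels : PySem.Set String) : List String :=
  rbllGo labels lines []

def postprocess_rendered_lines (lines : List String) (fields : List (String × String)) : List String :=
  let output := lines
  let output := if !pvFlag fields "__has_second_insured__" then remove_second_insured_block output else output
  let output := if !pvFlag fields "__has_home__" then remove_section output pvHome (some pvAuto) else output
  let output := if !pvFlag fields "__has_auto__" then
      remove_last_marker (remove_section output pvAuto none) pvHome else output
  let output := remove_blank_label_lines output pvLabels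
  let output := output.filter (fun l => l != pvHome)
  collapse_blank_lines output

-- ===== PORT B =====
def altLabels : List String :=
  ["Number of Units:", "Building Ordinance or Law:",
   "Sewer & Drain Damage:", "1st Mortgagee:", "Loan Number:"]

-- lines before the first occurrence of marker, and the lines after it (none if absent)
def altSplitFirst (marker : String) : List String → List String × Option (List String)
  | [] => ([], none)
  | l :: ls =>
    if l == marker then ([], some ls)
    else
      let r := altSplitFirst marker ls
      (l :: r.1, r.2)

def altCut (lines : List String) (start : String) (stop : Option String) : List String :=
  match altSplitFirst start lines with
  | (_, none) => lines
  | (pre, some tail) =>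
    match stop with
    | none => pre
    | some m =>
      match altSplitFirst m tail with
      | (_, none) => pre
      | (_, some rest) => pre ++ m :: rest

def altDropLast (lines : List String) (marker : String) : List String :=
  match altSplitFirst marker lines.reverse with
  | (_, none) => lines
  | (pre, some rest) => rest.reverse ++ pre.reverse

-- one backward pass: drop label/marker lines, collapse blank runs, trim trailing blanks
def altFinishGo : List String → List String → List String
  | [], acc => acc
  | l :: ls, acc =>
    let stripped := PySem.Str.strip l
    if altLabels.contains stripped || l == pvHome then altFinishGo ls acc
    else if stripped != "" then altFinishGo ls (acc ++ [l])
    else if acc ≠ [] ∧ acc.getLast? ≠ some "" then altFinishGo ls (acc ++ [""])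
    else altFinishGo ls acc

def postprocess_rendered_lines_alt (lines : List String) (fields : List (String × String)) : List String :=
  let out := lines
  let out := if !pvFlag fields "__has_second_insured__" && decide (9 ≤ out.length) then
      out.take 4 ++ out.drop 9 else out
  let out := if !pvFlag fields "__has_home__" then altCut out pvHome (some pvAuto) else out
  let out := if !pvFlag fields "__has_auto__" then altDropLast (altCut out pvAuto none) pvHome else out
  (altFinishGo out.reverse []).reverse

-- ===== PRECONDITION & SPEC =====
def Spec_postprocess_rendered_lines (lines : List String) (fields : List (String × String)) (out : List String) : Prop := out = postprocess_rendered_lines_alt lines fields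
instance (lines : List String) (fields : List (String × String)) (out : List String) : Decidable (Spec_postprocess_rendered_lines lines fields out) := by unfold Spec_postprocess_rendered_lines; infer_instance

-- ===== CLAIM (what is proved, stated in full; the proofs are below) =====
def Claim_equal_postprocess_rendered_lines : Prop := ∀ (lines : List String) (fields : List (String × String)), Dom_postprocess_rendered_lines lines fields → Spec_postprocess_rendered_lines lines fields (postprocess_rendered_lines lines fields)

-- ===== LEMMAS AND PROOFS =====

theorem rsib_eq (lines : List String) :
    remove_second_insured_block lines =
      if 9 ≤ lines.length then lines.take 4 ++ lines.drop 9 else lines := by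
  unfold remove_second_insured_block
  by_cases h : lines.length < 9
  · simp [h]
  · rw [PySem.List.slice_toNat lines (by norm_num) (by norm_num),
        PySem.List.slice_to lines (by norm_num), PySem.List.slice_from lines (by norm_num)]
    have h9 : 9 ≤ lines.length := by omega
    simp [h, h9]
    intro hc
    omega

theorem altSplitFirst_eq (m : String) (ls : List String) :
    altSplitFirst m ls =
      match PySem.List.index? ls m with
      | none => (ls, none)
      | some i => (ls.take i, some (ls.drop (i + 1))) := by
  induction ls with
  | nil => simp [altSplitFirst, PySem.List.index?]
  | cons l ls ih =>
    by_cases h : l = m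
    · subst h
      rw [PySem.List.index?_cons_self]
      simp [altSplitFirst]
    · rw [PySem.List.index?_cons_of_ne ls h]
      simp only [altSplitFirst, beq_iff_eq, if_neg h, ih]
      cases hix : PySem.List.index? ls m with
      | none => simp
      | some i => simp


theorem remove_section_eq (lines : List String) (s : String) (e : Option String) :
    remove_section lines s e = altCut lines s e := by
  unfold remove_section altCut
  rw [altSplitFirst_eq]
  cases hs : PySem.List.index? lines s with
  | none => simp
  | some s0 =>
    simp only
    have hto : PySem.List.slice lines none (some (s0 : Int)) = lines.take s0 :=
      by rw [PySem.List.slice_to lines (by positivity)]; simp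
    have hfrom1 : PySem.List.slice lines (some ((s0 : Int) + 1)) none = lines.drop (s0 + 1) := by
      rw [PySem.List.slice_from lines (by positivity)]
      norm_num
    have hlen : PySem.List.slice lines (some ((lines.length : Nat) : Int)) none = [] := by
      rw [PySem.List.slice_from lines (by positivity)]; simp
    cases e with
    | none =>
      simp only [hto, hlen]
      simp
    | some m =>
      simp only [hfrom1, altSplitFirst_eq]
      cases hj : PySem.List.index? (lines.drop (s0 + 1)) m with
      | none => simp [hto, hlen]
      | some j =>
        simp only [hto]
        rw [PySem.List.slice_from lines (by positivity)]
        norm_num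
        obtain ⟨hk, hm, -⟩ := PySem.List.getElem_of_index?_eq_some hj
        have h1 : ((s0 : Int) + 1 + (j : Int)).toNat = (s0 + 1) + j := by omega
        rw [h1, ← List.drop_drop (i := j) (j := s0 + 1), List.drop_eq_getElem_cons (by simpa using hk)]
        simp only [List.drop_drop]
        rw [hm]

-- proof-side: the loop as an optional find
def rlmFind (lines : List String) (marker : String) : List Int → Option (List String)
  | [] => none
  | i :: rest =>
    if PySem.List.pyGet? lines i == some marker then
      some (PySem.List.slice lines none (some i) ++ PySem.List.slice lines (some (i + 1)) none)
    else rlmFind lines marker rest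

theorem rlmGo_eq_find (lines : List String) (marker : String) (r : List Int) :
    rlmGo lines marker r = (rlmFind lines marker r).getD lines := by
  induction r with
  | nil => rfl
  | cons i rest ih =>
    simp only [rlmGo, rlmFind]
    split_ifs with h
    · simp
    · simpa using ih

theorem rlmFind_append (ys : List String) (y marker : String) (r : List Int)
    (hb : ∀ i ∈ r, 0 ≤ i ∧ i < (ys.length : Int)) :
    rlmFind (ys ++ [y]) marker r = (rlmFind ys marker r).map (· ++ [y]) := by
  induction r with
  | nil => rfl
  | cons i rest ih =>
    obtain ⟨h0, hlt⟩ := hb i (by simp)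
    have hget : PySem.List.pyGet? (ys ++ [y]) i = PySem.List.pyGet? ys i := by
      rw [PySem.List.pyGet?_of_nonneg _ h0, PySem.List.pyGet?_of_nonneg _ h0]
      rw [List.getElem?_append_left (by omega)]
    simp only [rlmFind, hget]
    split_ifs with h
    · have hsl1 : PySem.List.slice (ys ++ [y]) none (some i) = PySem.List.slice ys none (some i) := by
        rw [PySem.List.slice_to _ h0, PySem.List.slice_to _ h0]
        rw [List.take_append_of_le_length (by omega)]
      have hsl2 : PySem.List.slice (ys ++ [y]) (some (i + 1)) none
          = PySem.List.slice ys (some (i + 1)) none ++ [y] := by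
        rw [PySem.List.slice_from _ (by omega), PySem.List.slice_from _ (by omega)]
        rw [List.drop_append_of_le_length (by omega)]
      simp [hsl1, hsl2]
    · exact ih (fun i hi => hb i (by simp [hi]))

theorem rlmFind_full (marker : String) (ys : List String) :
    rlmFind ys marker (PySem.List.pyRange ((ys.length : Int) - 1) (-1) (-1)) =
      (match altSplitFirst marker ys.reverse with
       | (_, none) => none
       | (pre, some rest) => some (rest.reverse ++ pre.reverse)) := by
  induction ys using List.reverseRecOn with
  | nil =>
    rw [PySem.List.pyRange_neg_one_eq_nil (by norm_num)]
    simp [rlmFind, altSplitFirst]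
  | append_singleton ys y ih =>
    have hlen : ((ys ++ [y]).length : Int) - 1 = (ys.length : Int) := by simp
    rw [hlen, PySem.List.pyRange_neg_one_cons (by omega)]
    simp only [rlmFind, PySem.List.pyGet?_append_length]
    rw [List.reverse_append]
    simp only [List.reverse_singleton, List.singleton_append, altSplitFirst]
    by_cases hy : y = marker
    · simp only [hy, beq_self_eq_true, if_pos]
      have h1 : PySem.List.slice (ys ++ [marker]) none (some (ys.length : Int)) = ys := by
        rw [PySem.List.slice_to _ (by positivity)]
        simp
      have h2 : PySem.List.slice (ys ++ [marker]) (some ((ys.length : Int) + 1)) none = [] := by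
        rw [PySem.List.slice_from _ (by positivity)]
        apply List.drop_eq_nil_of_le
        simp
      simp [h1, h2]
    · have hne : (some y == some marker) = false := by simp [hy]
      rw [if_neg (by simp [hy])]
      have hbnd : ∀ i ∈ PySem.List.pyRange ((ys.length : Int) - 1) (-1) (-1),
          0 ≤ i ∧ i < (ys.length : Int) := by
        intro i hi
        rw [PySem.List.mem_pyRange_neg_one] at hi
        omega
      rw [rlmFind_append ys y marker _ hbnd, ih]
      simp only [beq_iff_eq, if_neg hy]
      cases h : altSplitFirst marker ys.reverse with
      | mk pre r =>
        cases r with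
        | none => simp
        | some rest => simp

theorem remove_last_marker_eq (lines : List String) (m : String) :
    remove_last_marker lines m = altDropLast lines m := by
  unfold remove_last_marker altDropLast
  rw [rlmGo_eq_find, rlmFind_full]
  cases h : altSplitFirst m lines.reverse with
  | mk pre r =>
    cases r with
    | none => simp
    | some rest => simp

theorem popBlanks_eq (l : List String) :
    popBlanks l = (l.reverse.dropWhile (fun s => s == "")).reverse := by
  induction l using List.reverseRecOn with
  | nil => rw [popBlanks]; simp
  | append_singleton xs x ih =>
    rw [popBlanks]
    by_cases hx : x = ""
    · subst hx
      simp only [List.getLast?_concat, List.dropLast_concat, ih,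
        List.reverse_append, List.reverse_singleton, List.singleton_append]
      rw [List.dropWhile_cons_of_pos (by simp)]
      simp
    · rw [dif_neg (by simp [hx])]
      rw [List.reverse_append]
      simp only [List.reverse_singleton, List.singleton_append]
      rw [List.dropWhile_cons_of_neg (by simp [hx])]
      simp

theorem popCons (x : String) (xs : List String) :
    popBlanks (x :: xs) =
      if popBlanks xs = [] then (if x = "" then [] else [x]) else x :: popBlanks xs := by
  rw [popBlanks_eq, popBlanks_eq]
  simp only [List.reverse_cons]
  rw [List.dropWhile_append]
  by_cases h : (xs.reverse.dropWhile (fun s => s == "")) = []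
  · simp [h]
    by_cases hx : x = "" <;> simp [hx]
  · simp [h]


def colR : List String → List String
  | [] => []
  | l :: ls =>
    let r := colR ls
    if PySem.Str.strip l != "" then l :: r
    else if r = [] then []
    else if r.head? = some "" then r else "" :: r

def stripOne : List String → List String
  | [] => []
  | x :: t => if x = "" then t else x :: t

theorem clb_append (ls : List String) : ∀ c b, clbGo ls c b = c ++ clbGo ls [] b := by
  induction ls with
  | nil => intro c b; simp [clbGo]
  | cons l ls ih =>
    intro c b
    by_cases h : PySem.Str.strip l = ""
    · simp only [clbGo, h, bne_self_eq_false, Bool.false_eq_true, if_false]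
      by_cases hb : b = 0
      · subst hb
        rw [if_pos (by norm_num), if_pos (by norm_num), List.nil_append,
          ih (c ++ [""]) (0+1), ih [""] (0+1)]
        simp
      · rw [if_neg (by simpa using hb), if_neg (by simpa using hb)]
        exact ih c (b + 1)
    · have h' : (PySem.Str.strip l != "") = true := by simpa using h
      simp only [clbGo, h', if_true, List.nil_append]
      rw [ih (c ++ [l]) 0, ih [l] 0]
      simp
theorem clb_state (ls : List String) : ∀ b b', 1 ≤ b → 1 ≤ b' →
    clbGo ls [] b = clbGo ls [] b' := by
  induction ls with
  | nil => intros; rfl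
  | cons l ls ih =>
    intro b b' hb hb'
    by_cases h : PySem.Str.strip l = ""
    · simp only [clbGo, h, bne_self_eq_false, Bool.false_eq_true, if_false]
      rw [if_neg (by simp; omega), if_neg (by simp; omega)]
      exact ih (b + 1) (b' + 1) (by omega) (by omega)
    · have h' : (PySem.Str.strip l != "") = true := by simpa using h
      simp only [clbGo, h', if_true]

theorem strip_empty : PySem.Str.strip "" = "" := by decide

theorem colR_getLast (ls : List String) : (colR ls).getLast? ≠ some "" := by
  induction ls with
  | nil => simp [colR]
  | cons l ls ih =>
    simp only [colR]
    by_cases h : PySem.Str.strip l = ""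
    · rw [if_neg (by simpa using h)]
      split_ifs with h1 h2
      · simp
      · exact ih
      · cases hr : colR ls with
        | nil => exact absurd hr h1
        | cons a t => rw [List.getLast?_cons_cons]; rw [hr] at ih; exact ih
    · rw [if_pos (by simpa using h)]
      cases hr : colR ls with
      | nil =>
        simp only [List.getLast?_singleton]
        intro hc
        apply h; rw [(Option.some.injEq _ _).mp hc]; exact strip_empty
      | cons a t => rw [List.getLast?_cons_cons]; rw [hr] at ih; exact ih

theorem strip_ne_imp (l : String) (h : ¬ PySem.Str.strip l = "") : l ≠ "" := by
  intro he; subst he; exact h strip_empty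

theorem clb_col (ls : List String) :
    popBlanks (clbGo ls [] 0) = colR ls ∧
    popBlanks (clbGo ls [] 1) = stripOne (colR ls) := by
  induction ls with
  | nil => constructor <;> · rw [popBlanks]; simp [clbGo, colR, stripOne]
  | cons l ls ih =>
    obtain ⟨ih0, ih1⟩ := ih
    by_cases h : PySem.Str.strip l = ""
    · have hgo0 : clbGo (l :: ls) [] 0 = "" :: clbGo ls [] 1 := by
        simp only [clbGo, h, bne_self_eq_false, Bool.false_eq_true, if_false]
        rw [if_pos (by norm_num)]
        rw [List.nil_append, clb_append ls [""] (0+1)]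
        rfl
      have hgo1 : clbGo (l :: ls) [] 1 = clbGo ls [] 1 := by
        simp only [clbGo, h, bne_self_eq_false, Bool.false_eq_true, if_false]
        rw [if_neg (by norm_num)]
        exact clb_state ls 2 1 (by norm_num) (by norm_num)
      have hcol : colR (l :: ls) =
          (if colR ls = [] then [] else
            if (colR ls).head? = some "" then colR ls else "" :: colR ls) := by
        simp only [colR, h, bne_self_eq_false, Bool.false_eq_true, if_false]
      constructor
      · rw [hgo0, popCons, ih1, hcol]
        cases hr : colR ls with
        | nil => simp [stripOne]
        | cons x t =>
          by_cases hx : x = ""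
          · subst hx
            have ht : t ≠ [] := by
              intro hte; subst hte
              exact colR_getLast ls (by rw [hr]; rfl)
            simp [stripOne, ht]
          · simp [stripOne, hx]
      · rw [hgo1, ih1, hcol]
        cases hr : colR ls with
        | nil => simp [stripOne]
        | cons x t =>
          by_cases hx : x = ""
          · subst hx; simp [stripOne]
          · simp [stripOne, hx]
    · have hl : l ≠ "" := strip_ne_imp l h
      have h' : (PySem.Str.strip l != "") = true := by simpa using h
      have hgo : ∀ b, clbGo (l :: ls) [] b = l :: clbGo ls [] 0 := by
        intro b
        simp only [clbGo, h', if_true]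
        rw [List.nil_append, clb_append ls [l] 0]
        rfl
      have hcol : colR (l :: ls) = l :: colR ls := by
        simp only [colR, h', if_true]
      constructor
      · rw [hgo 0, popCons, ih0, hcol, if_neg hl]
        split_ifs with h1
        · rw [h1]
        · rfl
      · rw [hgo 1, popCons, ih0, hcol, if_neg hl]
        simp only [stripOne, if_neg hl]
        split_ifs with h1
        · rw [h1]
        · rfl

def pvSkip (l : String) : Bool := altLabels.contains (PySem.Str.strip l) || l == pvHome
def pvKeep (l : String) : Bool := !pvSkip l

def finAux : List String → Option String → List String
  | [], _ => []
  | l :: ls, o =>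
    if pvSkip l then finAux ls o
    else if PySem.Str.strip l != "" then l :: finAux ls (some l)
    else if o ≠ none ∧ o ≠ some "" then "" :: finAux ls (some "")
    else finAux ls o

theorem fin_spec (ls : List String) : ∀ acc,
    altFinishGo ls acc = acc ++ finAux ls acc.getLast? := by
  induction ls with
  | nil => intro acc; simp [altFinishGo, finAux]
  | cons l ls ih =>
    intro acc
    simp only [altFinishGo, finAux, pvSkip]
    split_ifs with h1 h2 h3 h4 h5
    · exact ih acc
    · rw [ih (acc ++ [l])]; simp
    · rw [ih (acc ++ [""])]; simp
    · exact absurd ⟨fun hn => h3.1 (List.getLast?_eq_none_iff.mp hn), h3.2⟩ h4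
    · exact absurd ⟨fun hn => h5.1 (List.getLast?_eq_none_iff.mpr hn), h5.2⟩ h3
    · exact ih acc

theorem finAux_append (ys : List String) : ∀ (xs : List String) (o : Option String),
    finAux (xs ++ ys) o = finAux xs o ++ finAux ys (((finAux xs o).getLast?).or o) := by
  intro xs
  induction xs with
  | nil => intro o; simp [finAux]
  | cons x xs ih =>
    intro o
    simp only [List.cons_append, finAux]
    split_ifs with h1 h2 h3
    · exact ih o
    · rw [ih (some x)]
      simp only [List.cons_append]
      congr 2
      rcases htl : (finAux xs (some x)).getLast? with _ | v <;>
        simp [List.getLast?_cons, htl]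
    · rw [ih (some "")]
      simp only [List.cons_append]
      congr 2
      rcases htl : (finAux xs (some "")).getLast? with _ | v <;>
        simp [List.getLast?_cons, htl]
    · exact ih o

def ctx : List String → Option String → List String
  | [], _ => []
  | l :: m, o =>
    if pvSkip l then ctx m o
    else if PySem.Str.strip l != "" then l :: ctx m o
    else if (ctx m o).head? = some "" then ctx m o
    else if (ctx m o).head? ≠ none then "" :: ctx m o
    else if o = none then [] else if o = some "" then [] else [""]

theorem ctx_none (m : List String) : ctx m none = colR (m.filter pvKeep) := by
  induction m with
  | nil => simp [ctx, colR]
  | cons l m ih =>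
    simp only [ctx, ih]
    by_cases hs : pvSkip l
    · rw [if_pos hs, List.filter_cons_of_neg (by simp [pvKeep, hs])]
    · rw [if_neg hs, List.filter_cons_of_pos (by simp [pvKeep, hs])]
      simp only [colR]
      by_cases hb : PySem.Str.strip l != ""
      · rw [if_pos hb, if_pos hb]
      · rw [if_neg hb, if_neg hb]
        set r := colR (m.filter pvKeep) with hr
        by_cases h0 : r = []
        · simp [h0]
        · rw [if_neg h0]
          by_cases hh : r.head? = some ""
          · rw [if_pos hh, if_pos hh]
          · rw [if_neg hh, if_neg hh, if_pos (by simp [List.head?_eq_none_iff, h0])]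

theorem finAux_rev (m : List String) : ∀ o, finAux m.reverse o = (ctx m o).reverse := by
  induction m with
  | nil => intro o; simp [finAux, ctx]
  | cons l m ih =>
    intro o
    rw [List.reverse_cons, finAux_append [l] m.reverse o, ih o]
    simp only [List.getLast?_reverse]
    simp only [ctx, finAux]
    by_cases hs : pvSkip l
    · simp [hs]
    · rw [if_neg hs, if_neg hs]
      by_cases hb : PySem.Str.strip l != ""
      · rw [if_pos hb, if_pos hb]
        simp [finAux]
      · rw [if_neg hb, if_neg hb]
        rcases hh : (ctx m o).head? with _ | v
        · rw [List.head?_eq_none_iff] at hh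
          rw [hh]
          simp only [List.reverse_nil, List.nil_append, Option.none_or]
          rcases o with _ | x
          · simp
          · by_cases hx : x = ""
            · subst hx
              rw [if_neg (by simp), if_pos rfl]
              simp
            · rw [if_pos (by simp [hx]), if_neg (by simp), if_neg (by simp [hx])]
              simp [finAux, hx]
        · simp only [Option.some_or]
          by_cases hv : v = ""
          · subst hv
            simp
          · simp [hv]

theorem rbll_eq (labels : PySem.Set String) (ls : List String) : ∀ res,
    rbllGo labels ls res =
      res ++ ls.filter (fun l => !(PySem.Set.contains labels (PySem.Str.strip l))) := by
  induction ls with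
  | nil => intro res; simp [rbllGo]
  | cons l ls ih =>
    intro res
    simp only [rbllGo]
    by_cases h : PySem.Set.contains labels (PySem.Str.strip l)
    · rw [if_pos h, List.filter_cons_of_neg (by simpa using h), ih res]
    · rw [if_neg h, List.filter_cons_of_pos (by simpa using h), ih (res ++ [l])]
      simp

theorem labels_eq (y : String) :
    PySem.Set.contains pvLabels y = altLabels.contains y := by
  have h : pvLabels = altLabels := by decide
  rw [h]; rfl

theorem aFinish_eq (out : List String) :
    collapse_blank_lines ((remove_blank_label_lines out pvLabels).filter (fun l => l != pvHome)) =
      colR (out.filter pvKeep) := by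
  unfold collapse_blank_lines remove_blank_label_lines
  rw [rbll_eq, List.nil_append, List.filter_filter]
  rw [List.filter_congr (fun a _ => ?_), (clb_col (out.filter pvKeep)).1]
  show ((a != pvHome) && !(PySem.Set.contains pvLabels (PySem.Str.strip a))) = pvKeep a
  rw [labels_eq]
  simp only [pvKeep, pvSkip, Bool.not_or, bne]
  cases altLabels.contains (PySem.Str.strip a) <;> cases a == pvHome <;> rfl

theorem bFinish_eq (out : List String) :
    (altFinishGo out.reverse []).reverse = colR (out.filter pvKeep) := by
  rw [fin_spec, List.nil_append]
  simp only [List.getLast?_nil]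
  rw [finAux_rev, List.reverse_reverse, ctx_none]

theorem main_eq (lines : List String) (fields : List (String × String)) :
    postprocess_rendered_lines lines fields = postprocess_rendered_lines_alt lines fields := by
  unfold postprocess_rendered_lines postprocess_rendered_lines_alt
  dsimp only
  have h1 : (if !pvFlag fields "__has_second_insured__" then remove_second_insured_block lines else lines)
      = (if !pvFlag fields "__has_second_insured__" && decide (9 ≤ lines.length) then
          lines.take 4 ++ lines.drop 9 else lines) := by
    cases hf : pvFlag fields "__has_second_insured__" <;> simp [rsib_eq]
  rw [h1]
  generalize (if !pvFlag fields "__has_second_insured__" && decide (9 ≤ lines.length) then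
      lines.take 4 ++ lines.drop 9 else lines) = t1
  have h2 : (if !pvFlag fields "__has_home__" then remove_section t1 pvHome (some pvAuto) else t1)
      = (if !pvFlag fields "__has_home__" then altCut t1 pvHome (some pvAuto) else t1) := by
    rw [remove_section_eq]
  rw [h2]
  generalize (if !pvFlag fields "__has_home__" then altCut t1 pvHome (some pvAuto) else t1) = t2
  have h3 : (if !pvFlag fields "__has_auto__" then
        remove_last_marker (remove_section t2 pvAuto none) pvHome else t2)
      = (if !pvFlag fields "__has_auto__" then altDropLast (altCut t2 pvAuto none) pvHome else t2) := by
    rw [remove_section_eq, remove_last_marker_eq]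
  rw [h3]
  generalize (if !pvFlag fields "__has_auto__" then altDropLast (altCut t2 pvAuto none) pvHome else t2) = t3
  rw [aFinish_eq, bFinish_eq]

-- ===== VERDICT (by name: the statement is the Claim_ definition above) =====
theorem postprocess_rendered_lines_spec : Claim_equal_postprocess_rendered_lines := by
  intro lines fields _
  unfold Spec_postprocess_rendered_lines
  exact main_eq lines fields
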